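-- pv_equiv track=rewrite | github.com/roiei/ca | syntax_parser_hpp.py | __get_split_lines
-- ===== SOURCE A (Python) =====
-- def __get_split_lines(doxy_text):
--     lines = []
--     i = 0
--     line = ''
--     while i < len(doxy_text):
--         if doxy_text[i] == '@':
--             if line and line[0] == '@':
--                 lines += line,
--             line = '@'
--         else:
--             line += doxy_text[i]
--         i += 1
--
--     lines += line,
--     return lines
-- ===== SOURCE B (Python) =====
-- def __get_split_lines(doxy_text):
--     parts = doxy_text.split('@')
--     if len(parts) == 1:
--         return parts
--     return ['@' + p for p in parts[1:]]
-- ===== Notes on version B (the rewrite author's own statement) =====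
-- stated objective: faster
-- what changed: Replaces the character-by-character while loop that accumulates each segment by repeated string concatenation with a single str.split plus a comprehension re-prefixing each segment after the first (returning the whole text when the marker is absent, as A does).
import Mathlib
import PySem

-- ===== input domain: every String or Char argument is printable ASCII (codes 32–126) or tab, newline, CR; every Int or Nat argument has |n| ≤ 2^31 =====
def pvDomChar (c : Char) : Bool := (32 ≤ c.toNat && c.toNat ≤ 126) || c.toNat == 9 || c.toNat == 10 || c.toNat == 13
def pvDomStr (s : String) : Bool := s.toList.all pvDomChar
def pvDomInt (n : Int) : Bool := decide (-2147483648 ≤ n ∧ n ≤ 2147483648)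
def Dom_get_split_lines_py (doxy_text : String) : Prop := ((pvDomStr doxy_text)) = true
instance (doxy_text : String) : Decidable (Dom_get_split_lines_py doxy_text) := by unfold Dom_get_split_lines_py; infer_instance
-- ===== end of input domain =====

-- B replaces A's character-by-character accumulation loop with a single split('@') plus a
-- re-prefixing comprehension, avoiding quadratic repeated concatenation (objective: faster, as measured).

-- ===== PORT A =====
-- the while loop of A: state = (lines, line); on '@' flush line if it starts with '@', reset to "@";
-- otherwise append the character; after the loop append the final line.
def getSplitLinesLoop : List Char → List (List Char) → List Char → List (List Char)
  | [], lines, line => lines ++ [line]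
  | c :: cs, lines, line =>
    if c = '@' then
      getSplitLinesLoop cs
        (if line ≠ [] ∧ line.head? = some '@' then lines ++ [line] else lines) ['@']
    else
      getSplitLinesLoop cs lines (line ++ [c])

def get_split_lines_py (doxy_text : String) : List String :=
  (getSplitLinesLoop doxy_text.toList [] []).map String.ofList

-- ===== PORT B =====
def get_split_lines_py_alt (doxy_text : String) : List String :=
  let parts := PySem.Chars.splitOn doxy_text.toList "@".toList
  if parts.length = 1 then parts.map String.ofList
  else (parts.drop 1).map (fun p => String.ofList ('@' :: p))

-- ===== PRECONDITION & SPEC =====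
def Spec_get_split_lines_py (doxy_text : String) (out : List String) : Prop := out = get_split_lines_py_alt doxy_text
instance (doxy_text : String) (out : List String) : Decidable (Spec_get_split_lines_py doxy_text out) := by unfold Spec_get_split_lines_py; infer_instance

-- ===== CLAIM (what is proved, stated in full; the proofs are below) =====
def Claim_equal_get_split_lines_py : Prop := ∀ (doxy_text : String), Dom_get_split_lines_py doxy_text → Spec_get_split_lines_py doxy_text (get_split_lines_py doxy_text)

-- ===== LEMMAS AND PROOFS =====

-- structural specification of splitting a character list on '@'
def spAt : List Char → List (List Char)
  | [] => [[]]
  | c :: cs => if c = '@' then [] :: spAt cs else (spAt cs).modifyHead (c :: ·)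

theorem spAt_ne_nil : ∀ (l : List Char), spAt l ≠ [] := by
  intro l
  induction l with
  | nil => simp [spAt]
  | cons c cs ih =>
    simp only [spAt]
    split_ifs
    · simp
    · cases hh : spAt cs with
      | nil => exact absurd hh ih
      | cons q qs => simp [List.modifyHead]

theorem spAt_exists_cons (l : List Char) : ∃ q qs, spAt l = q :: qs := by
  cases hh : spAt l with
  | nil => exact absurd hh (spAt_ne_nil l)
  | cons q qs => exact ⟨q, qs, rfl⟩

theorem splitOn_go_eq : ∀ (fuel : Nat) (l cur : List Char) (acc : List (List Char)),
    l.length ≤ fuel →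
    PySem.Chars.splitOn.go ['@'] fuel l cur acc
      = acc.reverse ++ (spAt l).modifyHead (cur.reverse ++ ·) := by
  intro fuel
  induction fuel with
  | zero =>
    intro l cur acc h
    have : l = [] := List.length_eq_zero_iff.mp (Nat.le_zero.mp h)
    subst this
    simp [PySem.Chars.splitOn.go, spAt]
  | succ n ih =>
    intro l cur acc h
    cases l with
    | nil => simp [PySem.Chars.splitOn.go, spAt]
    | cons c rest =>
      by_cases hc : c = '@'
      · subst hc
        have hpre : List.isPrefixOf ['@'] ('@' :: rest) = true := by
          simp [List.isPrefixOf]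
        simp only [PySem.Chars.splitOn.go, hpre, if_pos]
        rw [show List.drop (['@'] : List Char).length ('@' :: rest) = rest from rfl]
        rw [ih rest [] (cur.reverse :: acc) (by simpa using Nat.le_of_succ_le_succ h)]
        simp only [spAt, List.modifyHead, List.reverse_cons, List.reverse_nil,
          List.nil_append, List.append_assoc, List.cons_append]
        obtain ⟨q, qs, hq⟩ := spAt_exists_cons rest
        simp [hq]
      · have hpre : List.isPrefixOf ['@'] (c :: rest) = false := by
          simp [List.isPrefixOf]
          exact fun hh => (hc hh.symm).elim
        simp only [PySem.Chars.splitOn.go, hpre]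
        rw [if_neg (by simp_all)]
        rw [ih rest (c :: cur) acc (by simpa using Nat.le_of_succ_le_succ h)]
        obtain ⟨q, qs, hq⟩ := spAt_exists_cons rest
        simp [spAt, hc, hq, List.modifyHead]

theorem splitOn_eq_spAt (l : List Char) : PySem.Chars.splitOn l ['@'] = spAt l := by
  unfold PySem.Chars.splitOn
  rw [splitOn_go_eq (l.length + 1) l [] [] (by omega)]
  obtain ⟨q, qs, hq⟩ := spAt_exists_cons l
  simp [hq]

-- once the current line starts with '@', the loop flushes exactly the '@'-prefixed segments
theorem loop_at : ∀ (cs : List Char) (lines : List (List Char)) (t p : List Char) (ps : List (List Char)),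
    spAt cs = p :: ps →
    getSplitLinesLoop cs lines ('@' :: t) = lines ++ ('@' :: (t ++ p)) :: ps.map ('@' :: ·) := by
  intro cs
  induction cs with
  | nil =>
    intro lines t p ps h
    simp only [spAt] at h
    injection h with h1 h2
    subst h1; subst h2
    simp [getSplitLinesLoop]
  | cons c rest ih =>
    intro lines t p ps h
    have hcond : ('@' :: t ≠ [] ∧ ('@' :: t).head? = some '@') := ⟨by simp, rfl⟩
    by_cases hc : c = '@'
    · subst hc
      simp only [spAt, if_true] at h
      injection h with h1 h2
      subst h1; subst h2
      simp only [getSplitLinesLoop, if_true]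
      rw [if_pos hcond]
      obtain ⟨q, qs, hq⟩ := spAt_exists_cons rest
      rw [ih (lines ++ [('@' :: t)]) [] q qs hq]
      simp [hq]
    · simp only [spAt, if_neg hc] at h
      obtain ⟨q, qs, hq⟩ := spAt_exists_cons rest
      rw [hq] at h
      simp only [List.modifyHead] at h
      injection h with h1 h2
      subst h1; subst h2
      simp only [getSplitLinesLoop, if_neg hc, List.cons_append]
      rw [ih lines (t ++ [c]) q qs hq]
      simp

-- before the first '@', the accumulated line never starts with '@' and is dropped at the first flush
theorem loop_pre : ∀ (cs line : List Char),
    line.head? ≠ some '@' →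
    ∀ (p : List Char) (ps : List (List Char)), spAt cs = p :: ps →
    getSplitLinesLoop cs [] line = if ps = [] then [line ++ p] else ps.map ('@' :: ·) := by
  intro cs
  induction cs with
  | nil =>
    intro line hline p ps h
    simp only [spAt] at h
    injection h with h1 h2
    subst h1; subst h2
    simp [getSplitLinesLoop]
  | cons c rest ih =>
    intro line hline p ps h
    by_cases hc : c = '@'
    · subst hc
      simp only [spAt, if_true] at h
      injection h with h1 h2
      subst h1; subst h2
      simp only [getSplitLinesLoop, if_true]
      rw [if_neg (by rintro ⟨hne, hhd⟩; exact hline hhd)]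
      obtain ⟨q, qs, hq⟩ := spAt_exists_cons rest
      rw [loop_at rest [] [] q qs hq]
      simp [hq]
    · simp only [spAt, if_neg hc] at h
      obtain ⟨q, qs, hq⟩ := spAt_exists_cons rest
      rw [hq] at h
      simp only [List.modifyHead] at h
      injection h with h1 h2
      subst h1; subst h2
      simp only [getSplitLinesLoop, if_neg hc]
      have hline' : (line ++ [c]).head? ≠ some '@' := by
        cases line with
        | nil => simpa using hc
        | cons a l => simpa using fun h => hline (by simp [h])
      rw [ih (line ++ [c]) hline' q qs hq]
      simp

-- splitting on '@' gives a single part exactly when that part is the whole text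
theorem spAt_singleton (l : List Char) : ∀ p, spAt l = [p] → p = l := by
  induction l with
  | nil =>
    intro p h
    simp only [spAt] at h
    injection h with h1 _
    exact h1.symm
  | cons c cs ih =>
    intro p h
    by_cases hc : c = '@'
    · subst hc
      simp only [spAt, if_true] at h
      injection h with _ h2
      exact absurd h2 (spAt_ne_nil cs)
    · simp only [spAt, if_neg hc] at h
      obtain ⟨q, qs, hq⟩ := spAt_exists_cons cs
      rw [hq] at h
      simp only [List.modifyHead] at h
      injection h with h1 h2
      subst h2
      rw [← h1, ih q hq]

-- ===== VERDICT (by name: the statement is the Claim_ definition above) =====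
theorem get_split_lines_py_spec : Claim_equal_get_split_lines_py := by
  intro s _
  unfold Spec_get_split_lines_py get_split_lines_py get_split_lines_py_alt
  obtain ⟨p, ps, hq⟩ := spAt_exists_cons s.toList
  have hsplit : PySem.Chars.splitOn s.toList "@".toList = p :: ps := by
    rw [show ("@".toList) = ['@'] from rfl, splitOn_eq_spAt, hq]
  rw [loop_pre s.toList [] (by simp) p ps hq]
  simp only [hsplit]
  cases ps with
  | nil => simp [spAt_singleton s.toList p hq]
  | cons q qs => simp
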